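-- pv_equiv track=rewrite | github.com/bjrnwnklr/AoC | 2021/solutions/aoc2021_20.py | img_dimensions
-- ===== SOURCE A (Python) =====
-- from collections import defaultdict
--
-- def img_dimensions(image: defaultdict[tuple[int], int]) -> list[tuple[int]]:
--     """Calculate the dimensions of the visible image by taking the
--     space occupied by "lit" pixels (== 1 value).
--
--     Adds padding of 1 pixel to each side.
--     """
--     padding = 1
--     lit_pixel_coords = [x for x in image if image[x] == 1]
--     min_r = min(lit_pixel_coords, key=lambda x: x[0])[0] - padding
--     max_r = max(lit_pixel_coords, key=lambda x: x[0])[0] + padding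
--     min_c = min(lit_pixel_coords, key=lambda x: x[1])[1] - padding
--     max_c = max(lit_pixel_coords, key=lambda x: x[1])[1] + padding
--
--     return [min_r, max_r, min_c, max_c]
-- ===== SOURCE B (Python) =====
-- def img_dimensions(image):
--     """Single pass over the image items keeping running min/max of row and
--     column over lit pixels; raises ValueError when no pixel is lit (as min()
--     does in the original)."""
--     bounds = None
--     for (r, c), v in image.items():
--         if v == 1:
--             if bounds is None:
--                 bounds = (r, r, c, c)
--             else:
--                 min_r, max_r, min_c, max_c = bounds
--                 if r < min_r:
--                     min_r = r
--                 if r > max_r: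
--                     max_r = r
--                 if c < min_c:
--                     min_c = c
--                 if c > max_c:
--                     max_c = c
--                 bounds = (min_r, max_r, min_c, max_c)
--     if bounds is None:
--         raise ValueError("no lit pixels")
--     min_r, max_r, min_c, max_c = bounds
--     return [min_r - 1, max_r + 1, min_c - 1, max_c + 1]
-- ===== Notes on version B (the rewrite author's own statement) =====
-- stated objective: alternative
-- what changed: Replaces the comprehension building the lit-pixel list plus four keyed min()/max() scans (each key re-looked-up in the dict during the comprehension) with one single pass over the dict items maintaining the four running extremes; Pre_ excludes inputs with no lit pixel (A's min() raises ValueError there, and so does B) and association lists with duplicate keys, which do not represent a Python dict.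
import Mathlib
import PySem

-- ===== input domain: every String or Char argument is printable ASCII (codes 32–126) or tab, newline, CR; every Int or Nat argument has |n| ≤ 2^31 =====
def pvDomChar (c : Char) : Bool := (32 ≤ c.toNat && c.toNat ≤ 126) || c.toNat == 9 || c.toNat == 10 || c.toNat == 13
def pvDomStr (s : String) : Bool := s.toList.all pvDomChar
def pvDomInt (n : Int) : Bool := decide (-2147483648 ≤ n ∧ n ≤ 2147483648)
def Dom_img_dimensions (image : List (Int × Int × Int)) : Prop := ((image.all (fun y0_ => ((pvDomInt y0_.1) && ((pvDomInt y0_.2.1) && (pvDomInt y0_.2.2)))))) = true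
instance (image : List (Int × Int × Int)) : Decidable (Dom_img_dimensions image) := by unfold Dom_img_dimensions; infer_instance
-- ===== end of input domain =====

-- B replaces A's lit-pixel comprehension (with a dict lookup per key) plus four
-- keyed min/max scans by one single pass maintaining four running extremes.


-- ===== PORT A =====
-- image[x]: first-match lookup in the association list (a Python dict lookup)
def pyLookup (image : List (Int × Int × Int)) (k : Int × Int) : Option Int :=
  match image with
  | [] => none
  | (r, c, v) :: t => if (r, c) = k then some v else pyLookup t k

def img_dimensions (image : List (Int × Int × Int)) : List Int :=
  let padding : Int := 1
  let lit_pixel_coords :=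
    (image.map (fun y => (y.1, y.2.1))).filter (fun x => pyLookup image x == some 1)
  match PySem.List.min? lit_pixel_coords (fun x => x.1),
        PySem.List.max? lit_pixel_coords (fun x => x.1),
        PySem.List.min? lit_pixel_coords (fun x => x.2),
        PySem.List.max? lit_pixel_coords (fun x => x.2) with
  | some a, some b, some c, some d =>
      [a.1 - padding, b.1 + padding, c.2 - padding, d.2 + padding]
  | _, _, _, _ => []   -- min() on the empty list raises ValueError; excluded by Pre_

-- ===== PORT B =====
-- the body of the `if v == 1` branch: seed or update the four running extremes
def bUpd (acc : Option (Int × Int × Int × Int)) (y : Int × Int × Int) :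
    Option (Int × Int × Int × Int) :=
  match acc with
  | none => some (y.1, y.1, y.2.1, y.2.1)
  | some (mr, xr, mc, xc) =>
      some ((if y.1 < mr then y.1 else mr), (if y.1 > xr then y.1 else xr),
            (if y.2.1 < mc then y.2.1 else mc), (if y.2.1 > xc then y.2.1 else xc))

def img_dimensions_alt (image : List (Int × Int × Int)) : List Int :=
  match image.foldl (fun acc y => if y.2.2 = 1 then bUpd acc y else acc) none with
  | none => []   -- B raises ValueError here; excluded by Pre_
  | some (mr, xr, mc, xc) => [mr - 1, xr + 1, mc - 1, xc + 1]

-- ===== PRECONDITION & SPEC =====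
-- Pre_ excludes images with no lit pixel (A's min() raises ValueError there, and
-- B raises too) and association lists with duplicate keys, which do not
-- represent any Python dict (A's parameter is a dict).
def Pre_img_dimensions (image : List (Int × Int × Int)) : Prop :=
  (image.map (fun y => (y.1, y.2.1))).Nodup ∧ ∃ y ∈ image, y.2.2 = 1
instance (image : List (Int × Int × Int)) : Decidable (Pre_img_dimensions image) := by
  unfold Pre_img_dimensions; infer_instance

def pvWitness_img_dimensions : (List (Int × Int × Int)) := [(0, 2, 1), (5, -1, 1), (3, 3, 0)]

def Spec_img_dimensions (image : List (Int × Int × Int)) (out : List Int) : Prop := out = img_dimensions_alt image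
instance (image : List (Int × Int × Int)) (out : List Int) : Decidable (Spec_img_dimensions image out) := by unfold Spec_img_dimensions; infer_instance

-- ===== CLAIM (what is proved, stated in full; the proofs are below) =====
def Claim_equal_img_dimensions : Prop := ∀ (image : List (Int × Int × Int)), Dom_img_dimensions image → Pre_img_dimensions image → Spec_img_dimensions image (img_dimensions image)

-- ===== LEMMAS AND PROOFS =====

-- With distinct keys, looking a member's key up in the list yields its value.
theorem pyLookup_of_mem (image : List (Int × Int × Int))
    (hnd : (image.map (fun y => (y.1, y.2.1))).Nodup) :
    ∀ y ∈ image, pyLookup image (y.1, y.2.1) = some y.2.2 := by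
  induction image with
  | nil => intro y hy; cases hy
  | cons z t ih =>
      simp only [List.map_cons, List.nodup_cons] at hnd
      intro y hy
      rcases List.mem_cons.mp hy with h | h
      · subst h; simp [pyLookup]
      · have hne : (z.1, z.2.1) ≠ (y.1, y.2.1) := by
          intro heq
          exact hnd.1 (heq ▸ List.mem_map.mpr ⟨y, h, rfl⟩)
        obtain ⟨zr, zc, zv⟩ := z
        simp only [pyLookup]
        rw [if_neg (by simpa using hne)]
        exact ih hnd.2 y h

-- A's comprehension, under distinct keys: keys of the lit items, in order.
theorem lit_eq (image : List (Int × Int × Int))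
    (hnd : (image.map (fun y => (y.1, y.2.1))).Nodup) :
    (image.map (fun y => (y.1, y.2.1))).filter (fun x => pyLookup image x == some 1)
      = (image.filter (fun y => y.2.2 = 1)).map (fun y => (y.1, y.2.1)) := by
  rw [List.filter_map]
  congr 1
  apply List.filter_congr
  intro y hy
  simp only [Function.comp]
  rw [pyLookup_of_mem image hnd y hy, Bool.eq_iff_iff]
  simp

-- guarded fold = fold over the filtered list
theorem foldl_guard {α β : Type} (p : β → Bool) (g : α → β → α) :
    ∀ (l : List β) (init : α),
      l.foldl (fun acc y => if p y then g acc y else acc) init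
        = (l.filter p).foldl g init := by
  intro l
  induction l with
  | nil => intro init; rfl
  | cons z t ih =>
      intro init
      by_cases h : p z <;> simp [h, ih]

theorem foldl_min_mem (l : List Int) : ∀ x : Int, l.foldl min x ∈ x :: l := by
  induction l with
  | nil => intro x; simp
  | cons z t ih =>
      intro x
      rw [List.foldl_cons]
      rcases List.mem_cons.mp (ih (min x z)) with h | h
      · rw [h]
        rcases min_choice x z with hm | hm <;> rw [hm] <;> simp
      · exact List.mem_cons_of_mem _ (List.mem_cons_of_mem _ h)

theorem foldl_min_le (l : List Int) : ∀ x : Int, ∀ y ∈ x :: l, l.foldl min x ≤ y := by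
  induction l with
  | nil =>
      intro x y hy
      simp only [List.mem_singleton] at hy
      subst hy; simp
  | cons z t ih =>
      intro x y hy
      have h1 := ih (min x z)
      simp only [List.foldl_cons]
      rcases List.mem_cons.mp hy with h | h
      · subst h
        exact le_trans (h1 _ (List.mem_cons_self)) (min_le_left _ _)
      · rcases List.mem_cons.mp h with h | h
        · subst h
          exact le_trans (h1 _ (List.mem_cons_self)) (min_le_right _ _)
        · exact h1 _ (List.mem_cons_of_mem _ h)

theorem foldl_max_mem (l : List Int) : ∀ x : Int, l.foldl max x ∈ x :: l := by
  induction l with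
  | nil => intro x; simp
  | cons z t ih =>
      intro x
      rw [List.foldl_cons]
      rcases List.mem_cons.mp (ih (max x z)) with h | h
      · rw [h]
        rcases max_choice x z with hm | hm <;> rw [hm] <;> simp
      · exact List.mem_cons_of_mem _ (List.mem_cons_of_mem _ h)

theorem foldl_max_ge (l : List Int) : ∀ x : Int, ∀ y ∈ x :: l, y ≤ l.foldl max x := by
  induction l with
  | nil =>
      intro x y hy
      simp only [List.mem_singleton] at hy
      subst hy; simp
  | cons z t ih =>
      intro x y hy
      have h1 := ih (max x z)
      simp only [List.foldl_cons]
      rcases List.mem_cons.mp hy with h | h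
      · subst h
        exact le_trans (le_max_left _ _) (h1 _ (List.mem_cons_self))
      · rcases List.mem_cons.mp h with h | h
        · subst h
          exact le_trans (le_max_right _ _) (h1 _ (List.mem_cons_self))
        · exact h1 _ (List.mem_cons_of_mem _ h)

-- min? by an Int key computes the running minimum of the keys
theorem key_min? {α : Type} (key : α → Int) (z : α) (t : List α) (a : α)
    (h : PySem.List.min? (z :: t) key = some a) :
    key a = (t.map key).foldl min (key z) := by
  have hmem : a ∈ z :: t := PySem.List.min?_mem h
  have hlb := PySem.List.min?_isMin h
  have h1 : (t.map key).foldl min (key z) ∈ key z :: t.map key := foldl_min_mem _ _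
  have h2 := foldl_min_le (t.map key) (key z)
  have hin : (t.map key).foldl min (key z) ∈ (z :: t).map key := by simpa using h1
  obtain ⟨y, hy, hyk⟩ := List.mem_map.mp hin
  have hka : key a ∈ key z :: t.map key := by
    have : key a ∈ (z :: t).map key := List.mem_map.mpr ⟨a, hmem, rfl⟩
    simpa using this
  exact le_antisymm (hyk ▸ hlb y hy) (h2 _ hka)

theorem key_max? {α : Type} (key : α → Int) (z : α) (t : List α) (a : α)
    (h : PySem.List.max? (z :: t) key = some a) :
    key a = (t.map key).foldl max (key z) := by
  have hmem : a ∈ z :: t := PySem.List.max?_mem h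
  have hub := PySem.List.max?_isMax h
  have h1 : (t.map key).foldl max (key z) ∈ key z :: t.map key := foldl_max_mem _ _
  have h2 := foldl_max_ge (t.map key) (key z)
  have hin : (t.map key).foldl max (key z) ∈ (z :: t).map key := by simpa using h1
  obtain ⟨y, hy, hyk⟩ := List.mem_map.mp hin
  have hka : key a ∈ key z :: t.map key := by
    have : key a ∈ (z :: t).map key := List.mem_map.mpr ⟨a, hmem, rfl⟩
    simpa using this
  exact le_antisymm (h2 _ hka) (hyk ▸ hub y hy)

-- B's fold with a `some` accumulator computes the four running extremes
theorem foldB (t : List (Int × Int × Int)) :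
    ∀ mr xr mc xc : Int,
      t.foldl bUpd (some (mr, xr, mc, xc))
        = some ((t.map (·.1)).foldl min mr, (t.map (·.1)).foldl max xr,
                (t.map (·.2.1)).foldl min mc, (t.map (·.2.1)).foldl max xc) := by
  induction t with
  | nil => intro mr xr mc xc; rfl
  | cons z t ih =>
      intro mr xr mc xc
      simp only [List.foldl_cons, List.map_cons]
      rw [show bUpd (some (mr, xr, mc, xc)) z
            = some (min mr z.1, max xr z.1, min mc z.2.1, max xc z.2.1) by
        simp only [bUpd]
        congr 1
        have h1 : (if z.1 < mr then z.1 else mr) = min mr z.1 := by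
          rcases min_choice mr z.1 with h | h <;> rw [h] <;> split <;> omega
        have h2 : (if z.1 > xr then z.1 else xr) = max xr z.1 := by
          rcases max_choice xr z.1 with h | h <;> rw [h] <;> split <;> omega
        have h3 : (if z.2.1 < mc then z.2.1 else mc) = min mc z.2.1 := by
          rcases min_choice mc z.2.1 with h | h <;> rw [h] <;> split <;> omega
        have h4 : (if z.2.1 > xc then z.2.1 else xc) = max xc z.2.1 := by
          rcases max_choice xc z.2.1 with h | h <;> rw [h] <;> split <;> omega
        rw [h1, h2, h3, h4]]
      exact ih _ _ _ _

-- ===== VERDICT (by name: the statement is the Claim_ definition above) =====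
theorem img_dimensions_spec : Claim_equal_img_dimensions := by
  intro image _hdom hpre
  obtain ⟨hnd, hlit⟩ := hpre
  unfold Spec_img_dimensions img_dimensions img_dimensions_alt
  -- the filtered (lit) item list is nonempty
  have hfilt : ∃ y ∈ image, (fun y => decide (y.2.2 = 1)) y = true := by
    obtain ⟨y, hy, hv⟩ := hlit; exact ⟨y, hy, by simp [hv]⟩
  obtain ⟨z, t, hL⟩ :
      ∃ z t, image.filter (fun y => decide (y.2.2 = 1)) = z :: t := by
    rcases hl : image.filter (fun y => decide (y.2.2 = 1)) with _ | ⟨z, t⟩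
    · obtain ⟨y, hy, hv⟩ := hfilt
      have : y ∈ image.filter (fun y => decide (y.2.2 = 1)) :=
        List.mem_filter.mpr ⟨hy, hv⟩
      rw [hl] at this; cases this
    · exact ⟨z, t, hl⟩
  -- rewrite A's comprehension
  have hlitEq := lit_eq image hnd
  simp only [hlitEq, hL, List.map_cons]
  -- B's fold
  have hBfold : image.foldl (fun acc y => if y.2.2 = 1 then bUpd acc y else acc) none
      = some ((t.map (·.1)).foldl min z.1, (t.map (·.1)).foldl max z.1,
              (t.map (·.2.1)).foldl min z.2.1, (t.map (·.2.1)).foldl max z.2.1) := by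
    have hfun : (fun (acc : Option (Int × Int × Int × Int)) (y : Int × Int × Int) =>
          if y.2.2 = 1 then bUpd acc y else acc)
        = (fun acc y => if (fun y : Int × Int × Int => decide (y.2.2 = 1)) y then bUpd acc y else acc) := by
      funext acc y
      by_cases h : y.2.2 = 1 <;> simp [h]
    rw [hfun, foldl_guard, hL, List.foldl_cons]
    show (t.foldl bUpd (bUpd none z)) = _
    rw [show bUpd none z = some (z.1, z.1, z.2.1, z.2.1) from rfl]
    exact foldB t z.1 z.1 z.2.1 z.2.1
  rw [hBfold]
  -- A's four min?/max? on the nonempty lit-coordinate list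
  set L := (z.1, z.2.1) :: t.map (fun y => (y.1, y.2.1)) with hLdef
  have hnonempty : L ≠ [] := by simp [hLdef]
  obtain ⟨a, ha⟩ : ∃ a, PySem.List.min? L (fun x => x.1) = some a := by
    rcases h : PySem.List.min? L (fun x => x.1) with _ | a
    · exact absurd ((PySem.List.min?_eq_none_iff L _).mp h) hnonempty
    · exact ⟨a, rfl⟩
  obtain ⟨b, hb⟩ : ∃ b, PySem.List.max? L (fun x => x.1) = some b := by
    rcases h : PySem.List.max? L (fun x => x.1) with _ | b
    · exact absurd ((PySem.List.max?_eq_none_iff L _).mp h) hnonempty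
    · exact ⟨b, rfl⟩
  obtain ⟨c, hc⟩ : ∃ c, PySem.List.min? L (fun x => x.2) = some c := by
    rcases h : PySem.List.min? L (fun x => x.2) with _ | c
    · exact absurd ((PySem.List.min?_eq_none_iff L _).mp h) hnonempty
    · exact ⟨c, rfl⟩
  obtain ⟨d, hd⟩ : ∃ d, PySem.List.max? L (fun x => x.2) = some d := by
    rcases h : PySem.List.max? L (fun x => x.2) with _ | d
    · exact absurd ((PySem.List.max?_eq_none_iff L _).mp h) hnonempty
    · exact ⟨d, rfl⟩
  rw [ha, hb, hc, hd]
  have hmap1 : (t.map (fun y => (y.1, y.2.1))).map (fun x : Int × Int => x.1)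
      = t.map (·.1) := by simp [List.map_map]
  have hmap2 : (t.map (fun y => (y.1, y.2.1))).map (fun x : Int × Int => x.2)
      = t.map (·.2.1) := by simp [List.map_map]
  have ea := key_min? (fun x : Int × Int => x.1) _ _ _ ha
  have eb := key_max? (fun x : Int × Int => x.1) _ _ _ hb
  have ec := key_min? (fun x : Int × Int => x.2) _ _ _ hc
  have ed := key_max? (fun x : Int × Int => x.2) _ _ _ hd
  rw [hmap1] at ea eb
  rw [hmap2] at ec ed
  simp only [ea, eb, ec, ed]
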